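-- pv_equiv track=rewrite | github.com/jycor/boga_bot | uwuify.py | uwuify
-- ===== SOURCE A (Python) =====
-- def uwuify(sentence):
--   """Converts a sentence to uwu-speak.
--
--   Args:
--     sentence: The sentence to convert.
--
--   Returns:
--     The uwu-ified sentence.
--   """
--
--   # Define a dictionary of uwu-speak replacements.
--   replacements = {
--       "l": "w",
--       "r": "w",
--       "th": "f",
--       "v": "bw",
--       "n": "ny",
--       "m": "my",
--       "o": "owo",
--       "a": "aw",
--       "e": "ew",
--       "i": "iw",
--       "u": "uwu",
--       "y": "wy",
--   }
--
--   # Replace all the letters in the sentence with their uwu-speak equivalents.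
--   uwu_sentence = ""
--   for letter in sentence:
--     if letter in replacements:
--       uwu_sentence += replacements[letter]
--     else:
--       uwu_sentence += letter
--
--   # Add some uwu-speak punctuation.
--   uwu_sentence = uwu_sentence.replace(".", " nya~")
--   uwu_sentence = uwu_sentence.replace("!", " >w<")
--   uwu_sentence = uwu_sentence.replace("?", " owo?")
--
--   # Return the uwu-ified sentence.
--   return uwu_sentence
-- ===== SOURCE B (Python) =====
-- def uwuify(sentence):
--   """Converts a sentence to uwu-speak (single table-driven pass)."""
--   table = str.maketrans({
--       "l": "w", "r": "w", "v": "bw", "n": "ny", "m": "my",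
--       "o": "owo", "a": "aw", "e": "ew", "i": "iw", "u": "uwu", "y": "wy",
--       ".": " nya~", "!": " >w<", "?": " owo?",
--   })
--   return sentence.translate(table)
-- ===== Notes on version B (the rewrite author's own statement) =====
-- stated objective: idiomatic
-- what changed: Replaces the per-character dict loop plus three subsequent whole-string replace passes by one combined translation table (letters and punctuation, dropping the dead 'th' key) applied in a single str.translate pass.
import Mathlib
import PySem

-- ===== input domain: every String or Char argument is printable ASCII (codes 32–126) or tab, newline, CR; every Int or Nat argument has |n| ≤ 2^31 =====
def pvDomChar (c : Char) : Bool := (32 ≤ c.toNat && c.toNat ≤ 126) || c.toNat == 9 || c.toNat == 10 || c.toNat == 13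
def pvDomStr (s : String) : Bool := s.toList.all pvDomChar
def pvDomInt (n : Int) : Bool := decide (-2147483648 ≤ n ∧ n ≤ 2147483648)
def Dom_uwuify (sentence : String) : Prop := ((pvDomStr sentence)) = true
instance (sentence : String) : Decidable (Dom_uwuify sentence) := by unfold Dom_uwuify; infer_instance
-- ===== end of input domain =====

-- B replaces A's per-character dict loop plus three whole-string replace passes by one
-- combined translation table applied in a single pass (idiomatic str.translate).


-- ===== PORT A =====
-- the replacements dict of A (string keys, including the dead "th" entry)
def uwuReplacements : PySem.Dict String String :=
  ⟨[("l","w"),("r","w"),("th","f"),("v","bw"),("n","ny"),("m","my"),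
    ("o","owo"),("a","aw"),("e","ew"),("i","iw"),("u","uwu"),("y","wy")]⟩

def uwuify (sentence : String) : String :=
  -- per-character loop building uwu_sentence
  let uwu := sentence.toList.foldl (fun acc letter =>
    let ls := String.singleton letter
    if uwuReplacements.contains ls then acc ++ (uwuReplacements.getD ls "").toList
    else acc ++ [letter]) []
  -- three replace passes
  let s1 := PySem.Chars.replace uwu ".".toList " nya~".toList
  let s2 := PySem.Chars.replace s1 "!".toList " >w<".toList
  let s3 := PySem.Chars.replace s2 "?".toList " owo?".toList
  String.ofList s3

-- ===== PORT B =====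
-- the combined translation table of Source B (maketrans: char -> replacement string)
def uwuTable : PySem.Dict Char String :=
  ⟨[('l',"w"),('r',"w"),('v',"bw"),('n',"ny"),('m',"my"),
    ('o',"owo"),('a',"aw"),('e',"ew"),('i',"iw"),('u',"uwu"),('y',"wy"),
    ('.'," nya~"),('!'," >w<"),('?'," owo?")]⟩

-- str.translate: each char is looked up in the table, absent chars pass through
def uwuify_alt (sentence : String) : String :=
  String.ofList (sentence.toList.flatMap (fun c => ((uwuTable.get? c).getD (String.singleton c)).toList))

-- ===== PRECONDITION & SPEC =====
def Spec_uwuify (sentence : String) (out : String) : Prop := out = uwuify_alt sentence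
instance (sentence : String) (out : String) : Decidable (Spec_uwuify sentence out) := by unfold Spec_uwuify; infer_instance

-- ===== CLAIM (what is proved, stated in full; the proofs are below) =====
def Claim_equal_uwuify : Prop := ∀ (sentence : String), Dom_uwuify sentence → Spec_uwuify sentence (uwuify sentence)

-- ===== LEMMAS AND PROOFS =====

-- A's per-character replacement as a function
def fA (c : Char) : List Char :=
  if uwuReplacements.contains (String.singleton c) then (uwuReplacements.getD (String.singleton c) "").toList
  else [c]

-- single-char replace as a function
def fRep (o : Char) (new : List Char) (c : Char) : List Char := if c == o then new else [c]

-- string-literal singletons compare like their chars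
theorem singleton_beq (a c : Char) : (String.singleton a == String.singleton c) = (a == c) := by
  simp [String.singleton]

-- replace with a single-char pattern is a flatMap
theorem replace_go_single (o : Char) (new : List Char) :
    ∀ (l : List Char) (fuel : Nat) (acc : List Char), l.length ≤ fuel →
      PySem.Chars.replace.go [o] new fuel l acc = acc.reverse ++ l.flatMap (fRep o new) := by
  intro l
  induction l with
  | nil => intro fuel acc _; cases fuel <;> simp [PySem.Chars.replace.go]
  | cons c t ih =>
    intro fuel acc h
    cases fuel with
    | zero => simp at h
    | succ f =>
      simp only [PySem.Chars.replace.go]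
      by_cases hc : o = c
      · subst hc
        rw [if_pos (by simp)]
        have hd : List.drop [o].length (o::t) = t := rfl
        rw [hd, ih f (new.reverse ++ acc) (by simpa using h)]
        simp [fRep]
      · rw [if_neg (by simp [hc])]
        rw [ih f (c :: acc) (by simpa using h)]
        have hc' : ¬ c = o := fun h' => hc h'.symm
        simp [fRep, hc']

theorem replace_single (cs : List Char) (o : Char) (new : List Char) :
    PySem.Chars.replace cs [o] new = cs.flatMap (fRep o new) := by
  rw [PySem.Chars.replace]
  simp only [List.isEmpty, Bool.false_eq_true, if_false]
  exact replace_go_single o new cs cs.length [] (le_refl _)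

-- pointwise: A's per-char replacement followed by the three replace passes equals B's table
theorem pointwise (c : Char) :
    (((fA c).flatMap (fRep '.' " nya~".toList)).flatMap (fRep '!' " >w<".toList)).flatMap
      (fRep '?' " owo?".toList)
      = ((uwuTable.get? c).getD (String.singleton c)).toList := by
  by_cases h1 : c = 'l'; · subst h1; decide
  by_cases h2 : c = 'r'; · subst h2; decide
  by_cases h3 : c = 'v'; · subst h3; decide
  by_cases h4 : c = 'n'; · subst h4; decide
  by_cases h5 : c = 'm'; · subst h5; decide
  by_cases h6 : c = 'o'; · subst h6; decide
  by_cases h7 : c = 'a'; · subst h7; decide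
  by_cases h8 : c = 'e'; · subst h8; decide
  by_cases h9 : c = 'i'; · subst h9; decide
  by_cases h10 : c = 'u'; · subst h10; decide
  by_cases h11 : c = 'y'; · subst h11; decide
  by_cases h12 : c = '.'; · subst h12; decide
  by_cases h13 : c = '!'; · subst h13; decide
  by_cases h14 : c = '?'; · subst h14; decide
  have hne : ∀ (a : Char), c ≠ a → (String.singleton a == String.singleton c) = false := by
    intro a ha
    rw [singleton_beq]
    exact beq_eq_false_iff_ne.mpr (Ne.symm ha)
  have hth : (("th" : String) == String.singleton c) = false := by
    simp [String.singleton, String.ext_iff]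
  simp only [fA, uwuReplacements, uwuTable, PySem.Dict.contains, PySem.Dict.get?,
    List.any]
  rw [show ("l" : String) = String.singleton 'l' from rfl,
      show ("r" : String) = String.singleton 'r' from rfl,
      show ("v" : String) = String.singleton 'v' from rfl,
      show ("n" : String) = String.singleton 'n' from rfl,
      show ("m" : String) = String.singleton 'm' from rfl,
      show ("o" : String) = String.singleton 'o' from rfl,
      show ("a" : String) = String.singleton 'a' from rfl,
      show ("e" : String) = String.singleton 'e' from rfl,
      show ("i" : String) = String.singleton 'i' from rfl,
      show ("u" : String) = String.singleton 'u' from rfl,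
      show ("y" : String) = String.singleton 'y' from rfl]
  rw [hne 'l' h1, hne 'r' h2, hne 'v' h3, hne 'n' h4, hne 'm' h5, hne 'o' h6,
      hne 'a' h7, hne 'e' h8, hne 'i' h9, hne 'u' h10, hne 'y' h11, hth]
  simp [fRep, h12, h13, h14, Ne.symm h1, Ne.symm h2, Ne.symm h3, Ne.symm h4, Ne.symm h5,
    Ne.symm h6, Ne.symm h7, Ne.symm h8, Ne.symm h9, Ne.symm h10, Ne.symm h11,
    Ne.symm h12, Ne.symm h13, Ne.symm h14]

-- ===== VERDICT (by name: the statement is the Claim_ definition above) =====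
theorem uwuify_spec : Claim_equal_uwuify := by
  intro s _
  unfold Spec_uwuify uwuify uwuify_alt
  have hb : (fun (acc : List Char) (letter : Char) =>
      let ls := String.singleton letter
      if uwuReplacements.contains ls then acc ++ (uwuReplacements.getD ls "").toList
      else acc ++ [letter]) = fun acc letter => acc ++ fA letter := by
    funext acc letter
    simp only [fA]
    split_ifs <;> rfl
  rw [hb, PySem.List.foldl_append_eq_flatMap]
  show String.ofList (PySem.Chars.replace (PySem.Chars.replace (PySem.Chars.replace
      ([] ++ List.flatMap fA s.toList) ['.'] " nya~".toList) ['!'] " >w<".toList)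
      ['?'] " owo?".toList) = _
  rw [replace_single, replace_single, replace_single]
  simp only [List.nil_append, List.flatMap_assoc]
  congr 1
  congr 1
  funext c
  have h := pointwise c
  simp only [List.flatMap_assoc] at h
  exact h
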